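-- pv_equiv track=rewrite | github.com/a0492658817-stack/final_term | OK03賓果遊戲.py | count
-- ===== SOURCE A (Python) =====
-- def count(List,n,same_set):
--     total=0
--     a=0
--     b=0
--
--     if all(List[i][i] in same_set for i in range(n)):
--         total+=1
--         a=1
--     if all(List[i][n-i-1] in same_set for i in range(n)):
--         total+=1
--         b=1
--     for i in range(n):
--         if all(List[i][j] in same_set for j in range(n)):
--             total += 1
--     for j in range(n):
--         if all(List[i][j] in same_set for i in range(n)):
--             total += 1
--     if(a and b):
--         total+=1
--     if all(List[i][0] in same_set for i in range(n)) and all(List[n-1][j] in same_set for j in range(n)):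
--         total += 1
--     return total
-- ===== SOURCE B (Python) =====
-- def count(List, n, same_set):
--     same = set(same_set)
--     row = {}
--     col = {}
--     diag = 0
--     anti = 0
--     for i in range(n):
--         for j in range(n):
--             if List[i][j] in same:
--                 row[i] = row.get(i, 0) + 1
--                 col[j] = col.get(j, 0) + 1
--                 if i == j:
--                     diag += 1
--                 if i + j == n - 1:
--                     anti += 1
--     a = diag == n
--     b = anti == n
--     total = int(a) + int(b)
--     total += sum(1 for i in range(n) if row.get(i, 0) == n)
--     total += sum(1 for j in range(n) if col.get(j, 0) == n)
--     if a and b: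
--         total += 1
--     if col.get(0, 0) == n and row.get(n - 1, 0) == n:
--         total += 1
--     return total
-- ===== Notes on version B (the rewrite author's own statement) =====
-- stated objective: faster
-- what changed: A re-scans the board once per line (each of the 2n+4 line checks walks up to n cells with its own generator); B makes one pass over the n*n cells, accumulating per-row/per-column/diagonal hit counters in dicts, reads every line verdict off the counters, and turns same_set into a set for O(1) membership. Pre_ excludes negative n (A returns 4 there only because every all() is vacuously true on an empty range, not a board) and boards with fewer than n rows or short rows (A raises IndexError or returns only because a generator short-circuits; B reads every cell).
-- outside the precondition, e.g. on count([], -1, set()): A returns 4, B returns 0; on count([[1, 2], [3]], 2, set()): A returns 0, B raises IndexError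
import Mathlib
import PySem

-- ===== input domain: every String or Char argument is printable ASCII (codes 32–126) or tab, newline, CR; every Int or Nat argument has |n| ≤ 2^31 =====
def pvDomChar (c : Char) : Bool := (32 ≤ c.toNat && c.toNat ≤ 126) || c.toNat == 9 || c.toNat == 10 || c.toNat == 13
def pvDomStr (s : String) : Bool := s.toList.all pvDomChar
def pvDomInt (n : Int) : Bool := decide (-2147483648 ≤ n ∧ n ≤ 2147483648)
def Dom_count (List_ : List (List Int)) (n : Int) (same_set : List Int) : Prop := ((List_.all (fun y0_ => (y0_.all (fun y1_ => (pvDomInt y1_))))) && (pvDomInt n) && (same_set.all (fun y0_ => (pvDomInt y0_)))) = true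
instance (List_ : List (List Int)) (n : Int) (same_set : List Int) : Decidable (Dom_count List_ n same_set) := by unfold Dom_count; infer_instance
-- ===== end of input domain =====

-- B replaces A's per-line re-scans (one generator per row/column/diagonal) by a single pass over the
-- n×n cells that accumulates per-row/per-column/diagonal hit counters, then reads each line verdict
-- off the counters; same_set becomes a set for O(1) membership (objective: faster by constant factor).

-- ===== PORT A =====
-- List[i][j]: both indices are nonnegative and in range under Pre_count
def pvCell (List_ : List (List Int)) (i j : Int) : Int :=
  PySem.List.pyGetD (PySem.List.pyGetD List_ i []) j 0

def count (List_ : List (List Int)) (n : Int) (same_set : List Int) : Int :=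
  let rng := PySem.List.pyRange 0 n 1
  let t0 : Int := 0
  let (t1, a) : Int × Int :=
    if rng.all (fun i => same_set.contains (pvCell List_ i i)) then (t0 + 1, 1) else (t0, 0)
  let (t2, b) : Int × Int :=
    if rng.all (fun i => same_set.contains (pvCell List_ i (n - i - 1))) then (t1 + 1, 1) else (t1, 0)
  let t3 := rng.foldl (fun t i => if rng.all (fun j => same_set.contains (pvCell List_ i j)) then t + 1 else t) t2
  let t4 := rng.foldl (fun t j => if rng.all (fun i => same_set.contains (pvCell List_ i j)) then t + 1 else t) t3
  let t5 := if a ≠ 0 ∧ b ≠ 0 then t4 + 1 else t4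
  let t6 := if rng.all (fun i => same_set.contains (pvCell List_ i 0)) &&
               rng.all (fun j => same_set.contains (pvCell List_ (n - 1) j)) then t5 + 1 else t5
  t6

-- ===== PORT B =====
def count_alt (List_ : List (List Int)) (n : Int) (same_set : List Int) : Int :=
  let same : PySem.Set Int := PySem.Set.ofList same_set
  let rng := PySem.List.pyRange 0 n 1
  let st : PySem.Dict Int Int × PySem.Dict Int Int × Int × Int :=
    rng.foldl (fun st i =>
      rng.foldl (fun st j =>
        if PySem.Set.contains same (pvCell List_ i j) then
          (PySem.Dict.modify st.1 i 0 (· + 1), PySem.Dict.modify st.2.1 j 0 (· + 1),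
           (if i = j then st.2.2.1 + 1 else st.2.2.1),
           (if i + j = n - 1 then st.2.2.2 + 1 else st.2.2.2))
        else st) st)
      (PySem.Dict.empty, PySem.Dict.empty, 0, 0)
  let a : Bool := decide (st.2.2.1 = n)
  let b : Bool := decide (st.2.2.2 = n)
  let u0 : Int := (if a then 1 else 0) + (if b then 1 else 0)
  let u1 := u0 + rng.foldl (fun s i => if PySem.Dict.getD st.1 i 0 = n then s + 1 else s) 0
  let u2 := u1 + rng.foldl (fun s j => if PySem.Dict.getD st.2.1 j 0 = n then s + 1 else s) 0
  let u3 := if a && b then u2 + 1 else u2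
  let u4 := if decide (PySem.Dict.getD st.2.1 0 0 = n) && decide (PySem.Dict.getD st.1 (n - 1) 0 = n)
            then u3 + 1 else u3
  u4

-- ===== PRECONDITION & SPEC =====
-- Pre_count restricts to the natural domain of an n×n bingo board: n ≥ 0 (A "returns" 4 on a negative n
-- only because every line check is vacuously true, an artefact outside the game's domain) and the first n
-- rows exist and have at least n cells (on undersized boards A either raises IndexError or returns only
-- because a generator short-circuits before the missing cell; B's single pass reads every cell).
def Pre_count (List_ : List (List Int)) (n : Int) (same_set : List Int) : Prop :=
  0 ≤ n ∧ n ≤ PySem.List.len List_ ∧ ∀ r ∈ List_.take n.toNat, n ≤ PySem.List.len r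
instance (List_ : List (List Int)) (n : Int) (same_set : List Int) : Decidable (Pre_count List_ n same_set) := by unfold Pre_count; infer_instance

def pvWitness_count : List (List Int) × Int × List Int := ([[1, 2], [3, 1]], 2, [1, 3])

def Spec_count (List_ : List (List Int)) (n : Int) (same_set : List Int) (out : Int) : Prop := out = count_alt List_ n same_set
instance (List_ : List (List Int)) (n : Int) (same_set : List Int) (out : Int) : Decidable (Spec_count List_ n same_set out) := by unfold Spec_count; infer_instance

-- ===== CLAIM (what is proved, stated in full; the proofs are below) =====
def Claim_equal_count : Prop := ∀ (List_ : List (List Int)) (n : Int) (same_set : List Int), Dom_count List_ n same_set → Pre_count List_ n same_set → Spec_count List_ n same_set (count List_ n same_set)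


-- ===== LEMMAS AND PROOFS =====

theorem pv_nested_foldl {σ : Type} (outer inner : List Int) (g : σ → Int → Int → σ) (st : σ) :
    outer.foldl (fun st i => inner.foldl (fun st j => g st i j) st) st
      = (outer.flatMap (fun i => inner.map (fun j => (i, j)))).foldl (fun st p => g st p.1 p.2) st := by
  rw [List.foldl_flatMap]
  simp [List.foldl_map]

theorem pv_countP_flatMap {α β : Type} (l : List α) (g : α → List β) (p : β → Bool) :
    (l.flatMap g).countP p = (l.map (fun x => (g x).countP p)).sum := by
  induction l with
  | nil => rfl
  | cons x xs ih => simp [List.countP_append, ih]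

theorem pv_countP_single (l : List Int) (hnd : l.Nodup) (a : Int) (ha : a ∈ l) (q : Int → Bool) :
    l.countP (fun x => (x == a) && q x) = if q a then 1 else 0 := by
  have h1 : (l.filter q).count a = l.countP (fun x => (x == a) && q x) := by
    rw [List.count_eq_countP, List.countP_filter]
  rw [← h1]
  by_cases hq : q a
  · rw [List.count_eq_one_of_mem (hnd.filter q) (List.mem_filter.mpr ⟨ha, hq⟩), if_pos hq]
  · rw [List.count_eq_zero_of_not_mem (fun hm => hq (List.mem_filter.mp hm).2), if_neg hq]

theorem pv_sum_map_single (l : List Int) (hnd : l.Nodup) (a : Int) (ha : a ∈ l) (f : Int → Nat)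
    (h0 : ∀ x ∈ l, x ≠ a → f x = 0) : (l.map f).sum = f a := by
  induction l with
  | nil => cases ha
  | cons x xs ih =>
    rcases List.mem_cons.mp ha with h | h
    · subst h
      have : ∀ y ∈ xs, f y = 0 := fun y hy =>
        h0 y (List.mem_cons_of_mem _ hy) (fun he => (List.nodup_cons.mp hnd).1 (he ▸ hy))
      have hz : (List.map f xs).sum = 0 := List.sum_eq_zero (by
        intro y hy; rcases List.mem_map.mp hy with ⟨z, hz, rfl⟩; exact this z hz)
      simp [hz]
    · have hx : f x = 0 := h0 x List.mem_cons_self (fun he => (List.nodup_cons.mp hnd).1 (he ▸ h))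
      simp [hx, ih (List.nodup_cons.mp hnd).2 h (fun y hy => h0 y (List.mem_cons_of_mem _ hy))]

def pvPairs (n : Int) : List (Int × Int) :=
  (PySem.List.pyRange 0 n 1).flatMap (fun i => (PySem.List.pyRange 0 n 1).map (fun j => (i, j)))

def pvHits (n : Int) (q : Int → Int → Bool) : List (Int × Int) :=
  (pvPairs n).filter (fun p => q p.1 p.2)

theorem pv_mem_rng {n i : Int} (h0 : 0 ≤ i) (h1 : i < n) : i ∈ PySem.List.pyRange 0 n 1 := by
  rw [PySem.List.mem_pyRange_one]; omega

theorem pv_cnt_fst (n : Int) (q : Int → Int → Bool) (i : Int) (h0 : 0 ≤ i) (h1 : i < n) :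
    ((pvHits n q).map Prod.fst).count i = (PySem.List.pyRange 0 n 1).countP (fun j => q i j) := by
  rw [List.count_eq_countP, List.countP_map]
  unfold pvHits
  rw [List.countP_filter]
  unfold pvPairs
  rw [pv_countP_flatMap]
  have hmap : ∀ i' : Int,
      ((PySem.List.pyRange 0 n 1).map (fun j => (i', j))).countP
        (fun p => ((· == i) ∘ Prod.fst) p && q p.1 p.2)
      = (PySem.List.pyRange 0 n 1).countP (fun j => (i' == i) && q i' j) := by
    intro i'; rw [List.countP_map]; rfl
  simp only [hmap]
  rw [pv_sum_map_single _ (PySem.List.nodup_pyRange_one 0 n) i (pv_mem_rng h0 h1)]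
  · apply List.countP_congr; intro j _; simp
  · intro x _ hx
    rw [List.countP_eq_zero]
    intro j _
    simp [hx]

theorem pv_cnt_snd (n : Int) (q : Int → Int → Bool) (j : Int) (h0 : 0 ≤ j) (h1 : j < n) :
    ((pvHits n q).map Prod.snd).count j = (PySem.List.pyRange 0 n 1).countP (fun i => q i j) := by
  rw [List.count_eq_countP, List.countP_map]
  unfold pvHits
  rw [List.countP_filter]
  unfold pvPairs
  rw [pv_countP_flatMap]
  have hmap : ∀ i' : Int,
      ((PySem.List.pyRange 0 n 1).map (fun j' => (i', j'))).countP
        (fun p => ((· == j) ∘ Prod.snd) p && q p.1 p.2)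
      = (PySem.List.pyRange 0 n 1).countP (fun j' => (j' == j) && q i' j') := by
    intro i'; rw [List.countP_map]; rfl
  simp only [hmap]
  have hpt : ∀ i' ∈ PySem.List.pyRange 0 n 1,
      (PySem.List.pyRange 0 n 1).countP (fun j' => (j' == j) && q i' j')
        = if q i' j then 1 else 0 := fun i' _ =>
    pv_countP_single _ (PySem.List.nodup_pyRange_one 0 n) j (pv_mem_rng h0 h1) _
  rw [List.map_congr_left hpt, PySem.List.sum_map_ite_one_zero_nat]

theorem pv_cnt_diag (n : Int) (q : Int → Int → Bool) :
    (pvHits n q).countP (fun p => decide (p.1 = p.2))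
      = (PySem.List.pyRange 0 n 1).countP (fun i => q i i) := by
  unfold pvHits
  rw [List.countP_filter]
  unfold pvPairs
  rw [pv_countP_flatMap]
  have hmap : ∀ i' : Int, i' ∈ PySem.List.pyRange 0 n 1 →
      ((PySem.List.pyRange 0 n 1).map (fun j => (i', j))).countP
        (fun p => decide (p.1 = p.2) && q p.1 p.2)
      = if q i' i' then 1 else 0 := by
    intro i' hi'
    rw [List.countP_map]
    have : ((fun p : Int × Int => decide (p.1 = p.2) && q p.1 p.2) ∘ (fun j => (i', j)))
        = (fun j => (j == i') && q i' j) := by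
      funext j
      by_cases h : i' = j
      · subst h; simp
      · have h2 : j ≠ i' := fun hh => h hh.symm
        simp [h, h2]
    rw [this]
    exact pv_countP_single _ (PySem.List.nodup_pyRange_one 0 n) i' hi' _
  rw [List.map_congr_left hmap, PySem.List.sum_map_ite_one_zero_nat]

theorem pv_cnt_anti (n : Int) (q : Int → Int → Bool) :
    (pvHits n q).countP (fun p => decide (p.1 + p.2 = n - 1))
      = (PySem.List.pyRange 0 n 1).countP (fun i => q i (n - i - 1)) := by
  unfold pvHits
  rw [List.countP_filter]
  unfold pvPairs
  rw [pv_countP_flatMap]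
  have hmap : ∀ i' : Int, i' ∈ PySem.List.pyRange 0 n 1 →
      ((PySem.List.pyRange 0 n 1).map (fun j => (i', j))).countP
        (fun p => decide (p.1 + p.2 = n - 1) && q p.1 p.2)
      = if q i' (n - i' - 1) then 1 else 0 := by
    intro i' hi'
    rw [List.countP_map]
    rw [PySem.List.mem_pyRange_one] at hi'
    have : ((fun p : Int × Int => decide (p.1 + p.2 = n - 1) && q p.1 p.2) ∘ (fun j => (i', j)))
        = (fun j => (j == n - i' - 1) && q i' j) := by
      funext j
      have h1 : decide (i' + j = n - 1) = (j == n - i' - 1) := by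
        rw [Bool.eq_iff_iff]; simp; omega
      simp only [Function.comp]; rw [h1]
    rw [this]
    exact pv_countP_single _ (PySem.List.nodup_pyRange_one 0 n) (n - i' - 1)
      (pv_mem_rng (by omega) (by omega)) _
  rw [List.map_congr_left hmap, PySem.List.sum_map_ite_one_zero_nat]

theorem pv_cnt_all (n : Int) (hn : 0 ≤ n) (p : Int → Bool) :
    ((((PySem.List.pyRange 0 n 1).countP p : Nat) : Int) = n)
      ↔ ((PySem.List.pyRange 0 n 1).all p = true) := by
  have hlen : (PySem.List.pyRange 0 n 1).length = n.toNat := by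
    rw [PySem.List.length_pyRange_one]; omega
  have hle : (PySem.List.pyRange 0 n 1).countP p ≤ n.toNat := hlen ▸ List.countP_le_length
  rw [List.all_eq_true]
  constructor
  · intro h
    have : (PySem.List.pyRange 0 n 1).countP p = (PySem.List.pyRange 0 n 1).length := by omega
    exact fun x hx => List.countP_eq_length.mp this x hx
  · intro h
    rw [List.countP_eq_length.mpr h, hlen]; omega

theorem pv_row_getD (H : List (Int × Int)) (i : Int) :
    (H.foldl (fun d p => PySem.Dict.modify d p.1 0 (· + 1)) PySem.Dict.empty).getD i 0
      = ((H.map Prod.fst).count i : Int) := by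
  rw [← List.foldl_map (f := Prod.fst) (g := fun d x => PySem.Dict.modify d x 0 (· + 1)),
    PySem.Dict.getD_foldl_modify_add_one]
  simp [PySem.Dict.getD, PySem.Dict.empty, PySem.Dict.get?]

theorem pv_col_getD (H : List (Int × Int)) (j : Int) :
    (H.foldl (fun d p => PySem.Dict.modify d p.2 0 (· + 1)) PySem.Dict.empty).getD j 0
      = ((H.map Prod.snd).count j : Int) := by
  rw [← List.foldl_map (f := Prod.snd) (g := fun d x => PySem.Dict.modify d x 0 (· + 1)),
    PySem.Dict.getD_foldl_modify_add_one]
  simp [PySem.Dict.getD, PySem.Dict.empty, PySem.Dict.get?]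

theorem pv_state (n : Int) (q : Int → Int → Bool) :
    (PySem.List.pyRange 0 n 1).foldl (fun st i => (PySem.List.pyRange 0 n 1).foldl
       (fun (st : PySem.Dict Int Int × PySem.Dict Int Int × Int × Int) j =>
          if q i j then
            (PySem.Dict.modify st.1 i 0 (· + 1), PySem.Dict.modify st.2.1 j 0 (· + 1),
             (if i = j then st.2.2.1 + 1 else st.2.2.1),
             (if i + j = n - 1 then st.2.2.2 + 1 else st.2.2.2))
          else st) st) (PySem.Dict.empty, PySem.Dict.empty, (0:Int), (0:Int))
    = ((pvHits n q).foldl (fun d p => PySem.Dict.modify d p.1 0 (· + 1)) PySem.Dict.empty,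
       (pvHits n q).foldl (fun d p => PySem.Dict.modify d p.2 0 (· + 1)) PySem.Dict.empty,
       (0:Int) + ((pvHits n q).countP (fun p => decide (p.1 = p.2)) : Int),
       (0:Int) + ((pvHits n q).countP (fun p => decide (p.1 + p.2 = n - 1)) : Int)) := by
  rw [pv_nested_foldl (PySem.List.pyRange 0 n 1) (PySem.List.pyRange 0 n 1)
      (fun st i j =>
        if q i j then
          (PySem.Dict.modify st.1 i 0 (· + 1), PySem.Dict.modify st.2.1 j 0 (· + 1),
           (if i = j then st.2.2.1 + 1 else st.2.2.1),
           (if i + j = n - 1 then st.2.2.2 + 1 else st.2.2.2))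
        else st)]
  rw [PySem.List.foldl_if_eq_foldl_filter (p := fun p : Int × Int => q p.1 p.2)
      (f := fun (st : PySem.Dict Int Int × PySem.Dict Int Int × Int × Int) (p : Int × Int) =>
        (PySem.Dict.modify st.1 p.1 0 (· + 1), PySem.Dict.modify st.2.1 p.2 0 (· + 1),
         (if p.1 = p.2 then st.2.2.1 + 1 else st.2.2.1),
         (if p.1 + p.2 = n - 1 then st.2.2.2 + 1 else st.2.2.2)))]
  rw [PySem.List.foldl_prod_mk (f := fun d (p : Int × Int) => PySem.Dict.modify d p.1 0 (· + 1))
      (g := fun (t : PySem.Dict Int Int × Int × Int) (p : Int × Int) =>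
        (PySem.Dict.modify t.1 p.2 0 (· + 1),
         (if p.1 = p.2 then t.2.1 + 1 else t.2.1),
         (if p.1 + p.2 = n - 1 then t.2.2 + 1 else t.2.2)))]
  rw [PySem.List.foldl_prod_mk (f := fun d (p : Int × Int) => PySem.Dict.modify d p.2 0 (· + 1))
      (g := fun (t : Int × Int) (p : Int × Int) =>
        ((if p.1 = p.2 then t.1 + 1 else t.1),
         (if p.1 + p.2 = n - 1 then t.2 + 1 else t.2)))]
  rw [PySem.List.foldl_prod_mk (f := fun (c : Int) (p : Int × Int) => if p.1 = p.2 then c + 1 else c)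
      (g := fun (c : Int) (p : Int × Int) => if p.1 + p.2 = n - 1 then c + 1 else c)]
  rw [PySem.List.foldl_ite_add_one (p := fun p : Int × Int => p.1 = p.2),
    PySem.List.foldl_ite_add_one (p := fun p : Int × Int => p.1 + p.2 = n - 1)]
  rfl



theorem count_spec : Claim_equal_count := by
  intro L n s _ hpre
  unfold Spec_count
  obtain ⟨hn, -, -⟩ := hpre
  rcases eq_or_lt_of_le hn with h0 | hpos
  · simp [count, count_alt, ← h0]
  · have hq : ∀ i j : Int, PySem.Set.contains (PySem.Set.ofList s) (pvCell L i j)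
        = s.contains (pvCell L i j) := by intro i j; simp [pysem]
    simp only [count, count_alt, hq]
    rw [pv_state n (fun i j => s.contains (pvCell L i j))]
    simp only [zero_add, pv_cnt_diag, pv_cnt_anti, pv_row_getD, pv_col_getD]
    simp only [PySem.List.foldl_ite_add_one]
    have hall := pv_cnt_all n hn
    have hc1 : decide (((((PySem.List.pyRange 0 n 1).countP fun i => s.contains (pvCell L i i)) : Nat) : Int) = n)
        = (PySem.List.pyRange 0 n 1).all (fun i => s.contains (pvCell L i i)) := by
      apply Bool.eq_iff_iff.mpr; simp only [decide_eq_true_eq]; exact hall _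
    have hc2 : decide (((((PySem.List.pyRange 0 n 1).countP fun i => s.contains (pvCell L i (n - i - 1))) : Nat) : Int) = n)
        = (PySem.List.pyRange 0 n 1).all (fun i => s.contains (pvCell L i (n - i - 1))) := by
      apply Bool.eq_iff_iff.mpr; simp only [decide_eq_true_eq]; exact hall _
    have hRcong : (PySem.List.pyRange 0 n 1).countP
          (fun i => decide (((((pvHits n fun i j => s.contains (pvCell L i j)).map Prod.fst).count i : Nat) : Int) = n))
        = (PySem.List.pyRange 0 n 1).countP
          (fun i => (PySem.List.pyRange 0 n 1).all (fun j => s.contains (pvCell L i j))) := by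
      apply List.countP_congr
      intro i hi
      rw [PySem.List.mem_pyRange_one] at hi
      rw [pv_cnt_fst n _ i (by omega) (by omega)]
      simp only [decide_eq_true_eq]; exact hall _
    have hCcong : (PySem.List.pyRange 0 n 1).countP
          (fun j => decide (((((pvHits n fun i j => s.contains (pvCell L i j)).map Prod.snd).count j : Nat) : Int) = n))
        = (PySem.List.pyRange 0 n 1).countP
          (fun j => (PySem.List.pyRange 0 n 1).all (fun i => s.contains (pvCell L i j))) := by
      apply List.countP_congr
      intro j hj
      rw [PySem.List.mem_pyRange_one] at hj
      rw [pv_cnt_snd n _ j (by omega) (by omega)]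
      simp only [decide_eq_true_eq]; exact hall _
    have hb1 : decide (((((pvHits n fun i j => s.contains (pvCell L i j)).map Prod.snd).count 0 : Nat) : Int) = n)
        = (PySem.List.pyRange 0 n 1).all (fun i => s.contains (pvCell L i 0)) := by
      rw [pv_cnt_snd n _ 0 (le_refl 0) hpos]
      apply Bool.eq_iff_iff.mpr; simp only [decide_eq_true_eq]; exact hall _
    have hb2 : decide (((((pvHits n fun i j => s.contains (pvCell L i j)).map Prod.fst).count (n - 1) : Nat) : Int) = n)
        = (PySem.List.pyRange 0 n 1).all (fun j => s.contains (pvCell L (n - 1) j)) := by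
      rw [pv_cnt_fst n _ (n - 1) (by omega) (by omega)]
      apply Bool.eq_iff_iff.mpr; simp only [decide_eq_true_eq]; exact hall _
    rw [hc1, hc2, hRcong, hCcong, hb1, hb2]
    cases h1 : (PySem.List.pyRange 0 n 1).all (fun i => s.contains (pvCell L i i)) <;>
      cases h2 : (PySem.List.pyRange 0 n 1).all (fun i => s.contains (pvCell L i (n - i - 1))) <;>
        cases h5 : (PySem.List.pyRange 0 n 1).all (fun i => s.contains (pvCell L i 0)) <;>
          cases h6 : (PySem.List.pyRange 0 n 1).all (fun j => s.contains (pvCell L (n - 1) j)) <;>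
            (try simp only [Bool.decide_eq_true, Bool.true_and, Bool.false_and, Bool.and_true,
                Bool.and_false, Bool.false_or, Bool.true_or, Bool.or_false, Bool.or_true,
                Bool.false_eq_true, if_true, if_false]) <;>
              omega
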